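-- pv_equiv track=rewrite | github.com/jucollas/new-darwin-ads | services/publishing-service/scripts/recover_from_meta.py | extract_conversions
-- ===== SOURCE A (Python) =====
-- MESSAGING_ACTION_TYPES = {
--     "onsite_conversion.messaging_conversation_started_7d",
--     "onsite_conversion.messaging_conversation_started",
--     "messages",
-- }
--
-- def extract_conversions(actions: list | None) -> int:
--     """Extract conversion count from Meta's actions array.
--     Uses the same action types as meta_insights_service.py.
--     """
--     if not actions:
--         return 0
--
--     total = 0
--     for action in actions:
--         if action.get("action_type") in MESSAGING_ACTION_TYPES:
--             total += int(action.get("value", 0))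
--
--     if total > 0:
--         return total
--
--     # Fallback: link clicks
--     for action in actions:
--         if action.get("action_type") == "link_click":
--             return int(action.get("value", 0))
--
--     return 0
-- ===== SOURCE B (Python) =====
-- MESSAGING_ACTION_TYPES = {
--     "onsite_conversion.messaging_conversation_started_7d",
--     "onsite_conversion.messaging_conversation_started",
--     "messages",
-- }
--
-- def extract_conversions(actions: list | None) -> int:
--     """Single pass: sum messaging conversions while capturing the first
--     link_click's raw value; fall back to it only if the total is not positive."""
--     if not actions:
--         return 0
--
--     total = 0
--     first_link = None
--     seen_link = False
--     for action in actions: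
--         t = action.get("action_type")
--         if t in MESSAGING_ACTION_TYPES:
--             total += int(action.get("value", 0))
--         elif t == "link_click" and not seen_link:
--             seen_link = True
--             first_link = action.get("value", 0)
--
--     if total > 0:
--         return total
--     if seen_link:
--         return int(first_link)
--     return 0
-- ===== Notes on version B (the rewrite author's own statement) =====
-- stated objective: alternative
-- what changed: Replaced A's two sequential scans (sum messaging values, then rescan for the first link_click) by a single pass that sums the total while capturing the first link_click's raw value, parsed only if the total is not positive.
import Mathlib
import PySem

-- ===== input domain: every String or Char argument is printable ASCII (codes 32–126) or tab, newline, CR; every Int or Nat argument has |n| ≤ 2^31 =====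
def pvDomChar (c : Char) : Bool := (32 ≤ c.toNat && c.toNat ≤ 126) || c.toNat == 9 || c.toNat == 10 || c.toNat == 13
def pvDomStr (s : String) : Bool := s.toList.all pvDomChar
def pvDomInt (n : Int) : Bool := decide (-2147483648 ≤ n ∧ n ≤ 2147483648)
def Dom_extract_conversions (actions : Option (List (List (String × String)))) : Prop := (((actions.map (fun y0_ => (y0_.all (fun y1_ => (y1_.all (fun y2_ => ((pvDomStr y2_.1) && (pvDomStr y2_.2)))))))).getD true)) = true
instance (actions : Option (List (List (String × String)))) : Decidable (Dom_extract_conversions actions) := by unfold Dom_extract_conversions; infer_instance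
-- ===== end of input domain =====

-- B folds A's two sequential scans into one pass that also captures the first
-- link_click's raw value (objective: alternative decomposition, same cost).

-- shared module context: the constant set and dict lookup (assoc list, first match)
def msgSet : List String :=
  ["onsite_conversion.messaging_conversation_started_7d",
   "onsite_conversion.messaging_conversation_started",
   "messages"]

-- action.get(k) : first-match association-list lookup (Python dict .get)
def pyGetStr (d : List (String × String)) (k : String) : Option String :=
  (d.find? (fun p => p.1 == k)).map (·.2)

-- int(action.get("value", 0)) : none = ValueError
def val? (a : List (String × String)) : Option Int :=
  match pyGetStr a "value" with
  | none => some 0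
  | some s => PySem.Int.ofStr? s

-- action.get("action_type") in MESSAGING_ACTION_TYPES (None is not in the set)
def isMsg (t : Option String) : Bool :=
  match t with
  | some s => msgSet.contains s
  | none => false

-- ===== PORT A =====
-- A's first loop: total accumulator; none once int() has raised
def stepA (acc : Option Int) (a : List (String × String)) : Option Int :=
  match acc with
  | none => none
  | some t => if isMsg (pyGetStr a "action_type") then (val? a).map (t + ·) else some t

-- A's second loop: return int(value) of the first link_click (0 if int() raises — outside Pre_)
def fallbackA : List (List (String × String)) → Int
  | [] => 0
  | a :: rest =>
      if pyGetStr a "action_type" == some "link_click" then (val? a).getD 0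
      else fallbackA rest

def extract_conversions (actions : Option (List (List (String × String)))) : Int :=
  match actions with
  | none => 0
  | some l =>
      if l.isEmpty then 0
      else
        match l.foldl stepA (some 0) with
        | none => 0   -- int() raised in the first loop: outside Pre_
        | some total =>
            if total > 0 then total else fallbackA l

-- ===== PORT B =====
-- B's single pass: (running total, captured raw value of the first link_click)
def stepB (st : Option Int × Option (Option String)) (a : List (String × String)) :
    Option Int × Option (Option String) :=
  let t := pyGetStr a "action_type"
  if isMsg t then
    ((match st.1 with
      | none => none
      | some tot => (val? a).map (tot + ·)), st.2)
  else if t == some "link_click" && st.2.isNone then (st.1, some (pyGetStr a "value"))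
  else st

-- int(first_link) after the pass (first_link is the raw value, default 0)
def parseLink : Option (Option String) → Int
  | none => 0
  | some v => (match v with | none => some 0 | some s => PySem.Int.ofStr? s).getD 0

def extract_conversions_alt (actions : Option (List (List (String × String)))) : Int :=
  match actions with
  | none => 0
  | some l =>
      if l.isEmpty then 0
      else
        let st := l.foldl stepB (some 0, none)
        match st.1 with
        | none => 0   -- int() raised: outside Pre_
        | some total =>
            if total > 0 then total else parseLink st.2

-- ===== PRECONDITION & SPEC =====
-- Pre_ excludes the inputs where Python's int() raises ValueError: a messaging action
-- with an unparsable value, or a first link_click action with an unparsable value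
-- (the latter is conservative: when the messaging total is positive A never parses
-- the link_click value and returns the total, as does B — see the cite).
def Pre_extract_conversions (actions : Option (List (List (String × String)))) : Prop :=
  (match actions with
   | none => true
   | some l =>
       l.all (fun a => !isMsg (pyGetStr a "action_type") || (val? a).isSome)
         && (match l.find? (fun a => pyGetStr a "action_type" == some "link_click") with
             | none => true
             | some a => (val? a).isSome)) = true

instance (actions : Option (List (List (String × String)))) : Decidable (Pre_extract_conversions actions) := by
  unfold Pre_extract_conversions; infer_instance

def pvWitness_extract_conversions : (Option (List (List (String × String)))) :=
  some [[("action_type", "messages"), ("value", "3")], [("action_type", "link_click"), ("value", "2")]]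

def Spec_extract_conversions (actions : Option (List (List (String × String)))) (out : Int) : Prop := out = extract_conversions_alt actions
instance (actions : Option (List (List (String × String)))) (out : Int) : Decidable (Spec_extract_conversions actions out) := by unfold Spec_extract_conversions; infer_instance

-- ===== CLAIM (what is proved, stated in full; the proofs are below) =====
def Claim_equal_extract_conversions : Prop := ∀ (actions : Option (List (List (String × String)))), Dom_extract_conversions actions → Pre_extract_conversions actions → Spec_extract_conversions actions (extract_conversions actions)

-- ===== LEMMAS AND PROOFS =====

-- one step of B's pass: the total component is one step of A's first loop
theorem stepB_fst (acc : Option Int) (fl : Option (Option String))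
    (a : List (String × String)) : (stepB (acc, fl) a).1 = stepA acc a := by
  unfold stepB stepA
  by_cases h : isMsg (pyGetStr a "action_type") = true
  · simp [h]
  · by_cases h2 : (pyGetStr a "action_type" == some "link_click" && fl.isNone) = true
    · simp [h, h2]; cases acc <;> rfl
    · simp [h, h2]; cases acc <;> rfl

-- first component of B's pass = A's first loop
theorem foldB_fst (l : List (List (String × String))) (acc : Option Int)
    (fl : Option (Option String)) :
    (l.foldl stepB (acc, fl)).1 = l.foldl stepA acc := by
  induction l generalizing acc fl with
  | nil => rfl
  | cons a rest ih =>
      rw [List.foldl_cons, List.foldl_cons, ← stepB_fst acc fl a]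
      simpa using ih (stepB (acc, fl) a).1 (stepB (acc, fl) a).2

-- "link_click" is not a messaging action type
theorem isMsg_ne_link (t : Option String) (h : isMsg t = true) :
    (t == some "link_click") = false := by
  cases t with
  | none => rfl
  | some s =>
      simp only [isMsg, msgSet, List.contains_eq_mem, List.mem_cons,
        List.not_mem_nil, or_false, decide_eq_true_eq] at h
      rcases h with rfl | rfl | rfl <;> decide

-- second component of B's pass, parsed, = A's fallback loop (or the captured value)
theorem foldB_snd (l : List (List (String × String))) (acc : Option Int)
    (fl : Option (Option String)) :
    parseLink (l.foldl stepB (acc, fl)).2 =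
      match fl with
      | some v => parseLink (some v)
      | none => fallbackA l := by
  induction l generalizing acc fl with
  | nil => cases fl <;> rfl
  | cons a rest ih =>
      rw [List.foldl_cons]
      have hih : parseLink (rest.foldl stepB (stepB (acc, fl) a)).2 =
          match (stepB (acc, fl) a).2 with
          | some v => parseLink (some v)
          | none => fallbackA rest := by
        simpa using ih (stepB (acc, fl) a).1 (stepB (acc, fl) a).2
      rw [hih]
      by_cases h : isMsg (pyGetStr a "action_type") = true
      · have hne := isMsg_ne_link _ h
        have h2 : (stepB (acc, fl) a).2 = fl := by simp [stepB, h]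
        rw [h2]
        cases fl with
        | some v => rfl
        | none => simp [fallbackA, hne]
      · by_cases hl : (pyGetStr a "action_type" == some "link_click") = true
        · cases fl with
          | none =>
              have h2 : (stepB (acc, none) a).2 = some (pyGetStr a "value") := by
                simp [stepB, h, hl]
              rw [h2]
              simp only [fallbackA, hl, if_pos]
              simp [parseLink, val?]
          | some v =>
              have h2 : (stepB (acc, some v) a).2 = some v := by simp [stepB, h, hl]
              rw [h2]
        · have h2 : (stepB (acc, fl) a).2 = fl := by simp [stepB, h, hl]
          rw [h2]
          cases fl with
          | some v => rfl
          | none => simp [fallbackA, hl]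

-- ===== VERDICT (by name: the statement is the Claim_ definition above) =====
theorem extract_conversions_spec : Claim_equal_extract_conversions := by
  intro actions _ _
  unfold Spec_extract_conversions extract_conversions extract_conversions_alt
  cases actions with
  | none => rfl
  | some l =>
      by_cases he : l.isEmpty
      · simp [he]
      · simp only [he, if_neg, Bool.false_eq_true, not_false_eq_true]
        rw [foldB_fst l (some 0) none]
        cases h : l.foldl stepA (some 0) with
        | none => rfl
        | some total =>
            by_cases ht : total > 0
            · simp [ht]
            · simp only [ht, if_neg, not_false_eq_true]
              rw [foldB_snd l (some 0) none]
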